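-- pv_equiv track=rewrite | github.com/JangyeonKim/CodingTestPython | 프로그래머스/3/12938. 최고의 집합/최고의 집합.py | solution
-- ===== SOURCE A (Python) =====
-- def solution(n, s):
--     if n > s :
--         return [-1]
--
--     div = s // n
--     rest = s % n
--
--     arr = [div for _ in range(n)]
--
--     for i in range(rest) :
--         arr[i] += 1
--
--     arr.sort()
--
--     return arr
-- ===== SOURCE B (Python) =====
-- def solution(n, s):
--     if n > s:
--         return [-1]
--     out = []
--     while n > 0:
--         q = -(-s // n)          # ceil(s / n): the largest element of the best set
--         out.append(q)
--         s -= q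
--         n -= 1
--     out.reverse()
--     return out
-- ===== Notes on version B (the rewrite author's own statement) =====
-- stated objective: alternative
-- what changed: B replaces A's div/mod block construction (fill with s//n, increment a prefix, sort) by a greedy peeling loop: it repeatedly extracts the maximum element ceil(s/n) from the remaining sum, building the answer back-to-front with one final reverse and no sort.
import Mathlib
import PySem

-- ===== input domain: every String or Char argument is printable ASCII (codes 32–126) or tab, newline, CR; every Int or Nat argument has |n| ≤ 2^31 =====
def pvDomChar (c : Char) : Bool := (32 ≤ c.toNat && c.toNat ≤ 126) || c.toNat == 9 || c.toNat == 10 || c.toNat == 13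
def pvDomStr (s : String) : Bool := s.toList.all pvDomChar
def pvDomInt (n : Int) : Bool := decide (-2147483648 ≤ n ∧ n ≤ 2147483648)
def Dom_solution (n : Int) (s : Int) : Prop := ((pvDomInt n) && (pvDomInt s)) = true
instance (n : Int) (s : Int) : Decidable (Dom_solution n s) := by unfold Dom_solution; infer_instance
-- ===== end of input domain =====

-- B replaces A's div/mod block construction + sort by a greedy loop that peels off the
-- maximum element ceil(s/n) from the remaining sum, building the answer back-to-front.

-- ===== PORT A =====
-- arr[i] += 1 is ported with pySetD/pyGetD; inside the loop 0 ≤ i < len(arr), where both are exact.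
def solution (n : Int) (s : Int) : List Int :=
  if n > s then [-1]
  else
    let div := PySem.Int.floordiv s n
    let rest := PySem.Int.mod s n
    let arr := (PySem.List.pyRange 0 n 1).map (fun _ => div)
    let arr := (PySem.List.pyRange 0 rest 1).foldl
      (fun a i => PySem.List.pySetD a i (PySem.List.pyGetD a i 0 + 1)) arr
    PySem.List.sorted arr (fun x => x) false

-- ===== PORT B =====
-- the Python while-loop: fuel n.toNat is exactly its iteration count (n decreases by 1 while n > 0)
def solAltLoop : Nat → Int → Int → List Int → List Int
  | 0, _, _, out => out
  | k+1, n, s, out =>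
      let q := -(PySem.Int.floordiv (-s) n)   -- -(-s // n) = ceil(s / n)
      solAltLoop k (n - 1) (s - q) (out ++ [q])

def solution_alt (n : Int) (s : Int) : List Int :=
  if n > s then [-1]
  else (solAltLoop n.toNat n s []).reverse

-- ===== PRECONDITION & SPEC =====
-- Pre_ excludes exactly the inputs where A raises ZeroDivisionError: n = 0 with 0 ≤ s
-- (when n = 0 and s < 0, A returns [-1] normally, so those stay inside Pre_).
def Pre_solution (n : Int) (s : Int) : Prop := ¬ (n = 0 ∧ 0 ≤ s)
instance (n : Int) (s : Int) : Decidable (Pre_solution n s) := by unfold Pre_solution; infer_instance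
def pvWitness_solution : Int × Int := (3, 7)

def Spec_solution (n : Int) (s : Int) (out : List Int) : Prop := out = solution_alt n s
instance (n : Int) (s : Int) (out : List Int) : Decidable (Spec_solution n s out) := by unfold Spec_solution; infer_instance

-- ===== CLAIM (what is proved, stated in full; the proofs are below) =====
def Claim_equal_solution : Prop := ∀ (n : Int) (s : Int), Dom_solution n s → Pre_solution n s → Spec_solution n s (solution n s)

-- ===== LEMMAS AND PROOFS =====

-- A's loop: after k increments, the array is k copies of (div+1) followed by (m-k) copies of div.
theorem solution_loop_inv (div : Int) (m k : Nat) (hk : k ≤ m) :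
    (PySem.List.pyRange 0 (k : Int) 1).foldl
      (fun a i => PySem.List.pySetD a i (PySem.List.pyGetD a i 0 + 1))
      (List.replicate m div)
    = List.replicate k (div + 1) ++ List.replicate (m - k) div := by
  induction k with
  | zero => simp [PySem.List.pyRange_one_eq_nil]
  | succ k ih =>
    have hk' : k ≤ m := Nat.le_of_succ_le hk
    have hsplit : PySem.List.pyRange 0 ((k : Int) + 1) 1
        = PySem.List.pyRange 0 (k : Int) 1 ++ [(k : Int)] :=
      PySem.List.pyRange_one_succ_right (by exact_mod_cast Nat.zero_le k)
    have : ((k : Nat) : Int) + 1 = ((k + 1 : Nat) : Int) := by push_cast; ring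
    rw [← this, hsplit, List.foldl_append, ih hk']
    simp only [List.foldl]
    have hget : PySem.List.pyGetD
        (List.replicate k (div + 1) ++ List.replicate (m - k) div) (k : Int) 0 = div := by
      rw [PySem.List.pyGetD_natCast]
      rw [List.getD_append_right _ _ _ _ (by simp)]
      have hmk : 0 < m - k := by omega
      simp [List.getD, hmk]
    rw [hget, PySem.List.pySetD_natCast]
    rw [List.set_append]
    simp only [List.length_replicate]
    rw [if_neg (by omega)]
    have hmk : m - k = (m - (k + 1)) + 1 := by omega
    rw [Nat.sub_self, hmk, List.replicate_succ, List.set_cons_zero]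
    rw [List.replicate_succ' (n := k) (a := div + 1), List.append_assoc]
    rfl

-- A's sort of (rest copies of div+1 ++ rem copies of div) is (rem copies of div ++ rest copies of div+1)
theorem solution_sorted_swap (div : Int) (p q : Nat) :
    PySem.List.sorted (List.replicate p (div + 1) ++ List.replicate q div) (fun x => x) false
    = List.replicate q div ++ List.replicate p (div + 1) := by
  apply PySem.List.sorted_id_eq_of_perm_of_pairwise
  · exact List.perm_append_comm
  · rw [List.pairwise_append]
    refine ⟨List.pairwise_replicate.mpr (Or.inr (le_refl _)),
      List.pairwise_replicate.mpr (Or.inr (le_refl _)), ?_⟩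
    intro a ha b hb
    rw [List.eq_of_mem_replicate ha, List.eq_of_mem_replicate hb]
    omega

-- B's greedy loop, fuel m+1, divisor M = m+1: it emits rest copies of (div+1) then the rest div's.
theorem alt_loop_spec (m : Nat) : ∀ (s : Int) (out : List Int),
    solAltLoop (m + 1) ((m : Int) + 1) s out
      = out ++ List.replicate (PySem.Int.mod s ((m : Int) + 1)).toNat
                 (PySem.Int.floordiv s ((m : Int) + 1) + 1)
             ++ List.replicate ((m + 1) - (PySem.Int.mod s ((m : Int) + 1)).toNat)
                 (PySem.Int.floordiv s ((m : Int) + 1)) := by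
  induction m with
  | zero =>
    intro s out
    simp [solAltLoop]

  | succ m ih =>
    intro s out
    set M : Int := ((m + 1 : Nat) : Int) + 1 with hM
    have hMpos : (0 : Int) < M := by positivity
    set d := PySem.Int.floordiv s M with hd
    set r := PySem.Int.mod s M with hr
    have hsum : d * M + r = s := PySem.Int.floordiv_mul_add_mod s M
    have hr0 : 0 ≤ r := PySem.Int.mod_nonneg (a := s) hMpos
    have hrM : r < M := PySem.Int.mod_lt (a := s) hMpos
    have hM1 : M - 1 = ((m : Nat) : Int) + 1 := by rw [hM]; push_cast; ring
    have hM1pos : (0 : Int) < M - 1 := by rw [hM1]; positivity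
    by_cases hrz : r = 0
    · -- q = d, remaining sum d*(M-1)
      have hq : -(PySem.Int.floordiv (-s) M) = d := by
        rw [PySem.Int.neg_floordiv_neg_eq_iff_of_pos hMpos]
        constructor <;> nlinarith
      show solAltLoop (m + 1) (M - 1) (s - -(PySem.Int.floordiv (-s) M))
            (out ++ [-(PySem.Int.floordiv (-s) M)]) = _
      rw [hq]
      have hs' : s - d = d * (M - 1) := by nlinarith
      have hd' : PySem.Int.floordiv (s - d) (M - 1) = d := by
        rw [PySem.Int.floordiv_eq_iff_of_pos hM1pos, hs']
        constructor <;> nlinarith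
      have hr' : PySem.Int.mod (s - d) (M - 1) = 0 := by
        have := PySem.Int.floordiv_mul_add_mod (s - d) (M - 1)
        rw [hd'] at this; nlinarith
      have := ih (s - d) (out ++ [d])
      rw [← hM1] at this
      rw [this, hd', hr', hrz]
      simp [List.replicate_succ, List.append_assoc]
    · -- r > 0: q = d+1, remaining sum d*(M-1) + (r-1)
      have hrpos : 0 < r := lt_of_le_of_ne hr0 (Ne.symm hrz)
      have hq : -(PySem.Int.floordiv (-s) M) = d + 1 := by
        rw [PySem.Int.neg_floordiv_neg_eq_iff_of_pos hMpos]
        constructor <;> nlinarith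
      show solAltLoop (m + 1) (M - 1) (s - -(PySem.Int.floordiv (-s) M))
            (out ++ [-(PySem.Int.floordiv (-s) M)]) = _
      rw [hq]
      have hd' : PySem.Int.floordiv (s - (d + 1)) (M - 1) = d := by
        rw [PySem.Int.floordiv_eq_iff_of_pos hM1pos]
        constructor <;> nlinarith
      have hr' : PySem.Int.mod (s - (d + 1)) (M - 1) = r - 1 := by
        have := PySem.Int.floordiv_mul_add_mod (s - (d + 1)) (M - 1)
        rw [hd'] at this; nlinarith
      have := ih (s - (d + 1)) (out ++ [d + 1])
      rw [← hM1] at this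
      rw [this, hd', hr']
      have hcnt1 : r.toNat = (r - 1).toNat + 1 := by omega
      rw [hcnt1]
      have hcnt2 : m + 1 + 1 - ((r - 1).toNat + 1) = m + 1 - (r - 1).toNat := by omega
      rw [hcnt2]
      simp [List.replicate_succ, List.append_assoc]

-- ===== VERDICT (by name: the statement is the Claim_ definition above) =====
theorem solution_spec : Claim_equal_solution := by
  intro n s _ hpre
  unfold Spec_solution solution solution_alt
  by_cases hns : n > s
  · simp [hns]
  · simp only [if_neg hns]
    set div := PySem.Int.floordiv s n with hdiv
    set rest := PySem.Int.mod s n with hrest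
    have hne : n ≠ 0 := by
      intro h0
      exact hpre ⟨h0, by omega⟩
    rcases lt_or_gt_of_ne hne with hneg | hpos
    · -- n < 0: A builds and sorts an empty array; B's loop runs zero times
      have h1 : PySem.List.pyRange 0 n 1 = [] :=
        PySem.List.pyRange_one_eq_nil (le_of_lt hneg)
      have hb := PySem.Int.mod_neg_bounds (a := s) hneg
      have h2 : PySem.List.pyRange 0 rest 1 = [] :=
        PySem.List.pyRange_one_eq_nil hb.2
      have h3 : n.toNat = 0 := by omega
      rw [h1, h2, h3]
      simp [solAltLoop, PySem.List.sorted_eq_nil_iff]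
    · -- n > 0
      have hr0 : 0 ≤ rest := PySem.Int.mod_nonneg (a := s) hpos
      have hrn : rest < n := PySem.Int.mod_lt (a := s) hpos
      -- A's side
      have hmap : (PySem.List.pyRange 0 n 1).map (fun _ => div)
          = List.replicate n.toNat div := by
        rw [List.eq_replicate_iff]
        constructor
        · simp [PySem.List.length_pyRange_one]
        · intro b hb
          simp at hb
          tauto
      rw [hmap]
      have hcast : rest = ((rest.toNat : Nat) : Int) := (Int.toNat_of_nonneg hr0).symm
      have hle : rest.toNat ≤ n.toNat := by omega
      rw [hcast, solution_loop_inv div n.toNat rest.toNat hle, solution_sorted_swap]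
      -- B's side
      obtain ⟨m, hm⟩ : ∃ m : Nat, n.toNat = m + 1 := ⟨n.toNat - 1, by omega⟩
      have hnm : n = ((m : Nat) : Int) + 1 := by omega
      rw [hm, hnm, alt_loop_spec m s []]
      rw [← hnm, ← hdiv, ← hrest, List.nil_append, List.reverse_append,
        List.reverse_replicate, List.reverse_replicate]
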